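-- pv_equiv track=rewrite | github.com/shadman17/leetcode | Turing_questions/1.IP_check.py | ipv6
-- ===== SOURCE A (Python) =====
-- def ipv6(s):
--     arr = s.split(":")
--     if len(arr) != 8:
--         return False
--     for segment in arr:
--         if not segment:
--             return False
--         if len(segment) > 4:
--             return False
--         for c in segment:
--             if c not in ("1234567890abcdefABCDEF"):
--                 return False
--     return True
-- ===== SOURCE B (Python) =====
-- def ipv6(s):
--     # single left-to-right scan; no split, no nested loops
--     seglen = 0
--     groups = 1
--     for c in s:
--         if c == ':':
--             if seglen == 0:
--                 return False
--             groups += 1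
--             seglen = 0
--         elif c in "0123456789abcdefABCDEF":
--             seglen += 1
--             if seglen > 4:
--                 return False
--         else:
--             return False
--     return seglen > 0 and groups == 8
-- ===== Notes on version B (the rewrite author's own statement) =====
-- stated objective: alternative
-- what changed: Replaced split-into-segments plus a nested per-segment character loop with a single left-to-right character scan that tracks the current segment length and the group count, deciding validity in one pass with no intermediate list.
import Mathlib
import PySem

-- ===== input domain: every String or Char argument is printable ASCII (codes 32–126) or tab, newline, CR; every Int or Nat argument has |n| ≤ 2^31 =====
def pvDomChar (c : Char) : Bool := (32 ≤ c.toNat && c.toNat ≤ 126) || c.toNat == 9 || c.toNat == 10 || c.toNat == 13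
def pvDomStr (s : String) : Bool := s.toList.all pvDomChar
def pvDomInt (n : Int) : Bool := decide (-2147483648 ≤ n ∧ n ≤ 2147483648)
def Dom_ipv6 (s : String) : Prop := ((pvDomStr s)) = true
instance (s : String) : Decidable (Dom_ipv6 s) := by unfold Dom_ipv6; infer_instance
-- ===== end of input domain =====

-- B replaces split + nested per-segment loop by one left-to-right character scan tracking segment length and group count (alternative algorithm, no intermediate list).

-- ===== PORT A =====
-- "1234567890abcdefABCDEF".toList, written as a char-list literal
def ipv6Hex : List Char :=
  ['1','2','3','4','5','6','7','8','9','0','a','b','c','d','e','f','A','B','C','D','E','F']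

-- A's outer loop over the segments (early returns become `false` results)
def ipv6SegLoop : List (List Char) → Bool
  | [] => true
  | seg :: rest =>
    if seg.isEmpty then false
    else if seg.length > 4 then false
    else if seg.all (fun c => ipv6Hex.contains c) then ipv6SegLoop rest
    else false

def ipv6 (s : String) : Bool :=
  let arr := PySem.Chars.splitOn s.toList [':']
  if arr.length ≠ 8 then false
  else ipv6SegLoop arr

-- ===== PORT B =====
-- "0123456789abcdefABCDEF".toList, written as a char-list literal
def ipv6AltHex : List Char :=
  ['0','1','2','3','4','5','6','7','8','9','a','b','c','d','e','f','A','B','C','D','E','F']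

-- B's loop body: state = (seglen, groups); `none` = early `return False`
def ipv6AltStep (st : Option (Nat × Nat)) (c : Char) : Option (Nat × Nat) :=
  match st with
  | none => none
  | some (seglen, groups) =>
    if c = ':' then
      if seglen = 0 then none else some (0, groups + 1)
    else if ipv6AltHex.contains c then
      if seglen + 1 > 4 then none else some (seglen + 1, groups)
    else none

def ipv6_alt (s : String) : Bool :=
  match s.toList.foldl ipv6AltStep (some (0, 1)) with
  | none => false
  | some (seglen, groups) => decide (0 < seglen) && (groups == 8)

-- ===== PRECONDITION & SPEC =====
def Spec_ipv6 (s : String) (out : Bool) : Prop := out = ipv6_alt s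
instance (s : String) (out : Bool) : Decidable (Spec_ipv6 s out) := by unfold Spec_ipv6; infer_instance

-- ===== CLAIM (what is proved, stated in full; the proofs are below) =====
def Claim_equal_ipv6 : Prop := ∀ (s : String), Dom_ipv6 s → Spec_ipv6 s (ipv6 s)

-- ===== LEMMAS AND PROOFS =====

-- simple single-character split on ':' (proof-side model of s.split(":"))
def splitColon : List Char → List (List Char)
  | [] => [[]]
  | c :: rest =>
    if c = ':' then [] :: splitColon rest
    else
      match splitColon rest with
      | g :: gs => (c :: g) :: gs
      | [] => [[c]]

lemma splitColon_ne_nil (l : List Char) : splitColon l ≠ [] := by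
  induction l with
  | nil => simp [splitColon]
  | cons c rest ih =>
    simp only [splitColon]
    split
    · simp
    · cases h : splitColon rest <;> simp

-- prepend a prefix to the first segment
def consFirst (x : List Char) : List (List Char) → List (List Char)
  | g :: gs => (x ++ g) :: gs
  | [] => [x]

lemma go_eq (l : List Char) : ∀ (fuel : Nat) (cur : List Char) (acc : List (List Char)),
    l.length ≤ fuel →
    PySem.Chars.splitOn.go [':'] fuel l cur acc = acc.reverse ++ consFirst cur.reverse (splitColon l) := by
  induction l with
  | nil =>
    intro fuel cur acc _
    cases fuel <;> simp [PySem.Chars.splitOn.go, splitColon, consFirst]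
  | cons c rest ih =>
    intro fuel cur acc hle
    cases fuel with
    | zero => simp at hle
    | succ f =>
      by_cases hc : c = ':'
      · subst hc
        have hpre : List.isPrefixOf [':'] (':' :: rest) = true := by simp [List.isPrefixOf]
        rw [PySem.Chars.splitOn.go, if_pos hpre]
        simp only [List.length_cons, List.length_nil, List.drop_succ_cons, List.drop_zero,
          Nat.zero_add] at *
        rw [ih f [] (cur.reverse :: acc) (by omega)]
        cases h : splitColon rest with
        | nil => exact absurd h (splitColon_ne_nil rest)
        | cons g gs => simp [splitColon, consFirst, h]
      · have hpre : List.isPrefixOf [':'] (c :: rest) = false := by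
          simp [List.isPrefixOf]
          exact fun h => absurd h.symm hc
        rw [PySem.Chars.splitOn.go, if_neg (by simp [hpre])]
        simp only [List.length_cons] at hle
        rw [ih f (c :: cur) acc (by omega)]
        cases h : splitColon rest with
        | nil => exact absurd h (splitColon_ne_nil rest)
        | cons g gs => simp [splitColon, consFirst, h, hc]

lemma splitOn_colon (l : List Char) : PySem.Chars.splitOn l [':'] = splitColon l := by
  rw [PySem.Chars.splitOn, go_eq l (l.length + 1) [] [] (by omega)]
  cases h : splitColon l with
  | nil => exact absurd h (splitColon_ne_nil l)
  | cons g gs => simp [consFirst]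

-- the two hex alphabets contain the same characters
lemma hex_same (c : Char) : ipv6Hex.contains c = ipv6AltHex.contains c := by
  by_cases h : c ∈ ipv6AltHex
  · have h' : c ∈ ipv6Hex := by
      simp only [ipv6AltHex] at h
      simp only [ipv6Hex]
      fin_cases h <;> decide
    simp [h, h']
  · have h' : c ∉ ipv6Hex := by
      intro hc
      apply h
      simp only [ipv6Hex] at hc
      simp only [ipv6AltHex]
      fin_cases hc <;> decide
    simp [h, h']

-- segment validity as A checks it
def segOk (seg : List Char) : Bool :=
  !seg.isEmpty && decide (seg.length ≤ 4) && seg.all (fun c => ipv6AltHex.contains c)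

lemma segLoop_eq_all (ss : List (List Char)) : ipv6SegLoop ss = ss.all segOk := by
  induction ss with
  | nil => rfl
  | cons seg rest ih =>
    rw [show ipv6SegLoop (seg :: rest) =
      (if seg.isEmpty then false
       else if seg.length > 4 then false
       else if seg.all (fun c => ipv6Hex.contains c) then ipv6SegLoop rest
       else false) from rfl, List.all_cons, ih]
    have hx : (seg.all fun c => ipv6Hex.contains c) = seg.all fun c => ipv6AltHex.contains c := by
      induction seg with
      | nil => rfl
      | cons a t iht => rw [List.all_cons, List.all_cons, hex_same a, iht]
    by_cases h1 : seg.isEmpty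
    · simp [segOk, h1]
    · by_cases h2 : seg.length > 4
      · have h4 : ¬ (seg.length ≤ 4) := by omega
        simp [segOk, h1, h2, h4]
      · by_cases h3 : (seg.all fun c => ipv6Hex.contains c)
        · rw [hx] at h3
          have hok : segOk seg = true := by
            unfold segOk
            rw [h3]
            simp [h1]
            omega
          rw [if_neg h1, if_neg h2, hx, h3, if_pos rfl, hok]
          simp
        · rw [hx] at h3
          have h3' : (seg.all fun c => ipv6AltHex.contains c) = false :=
            Bool.not_eq_true _ ▸ (by simpa using h3)
          have hok : segOk seg = false := by
            unfold segOk
            rw [h3']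
            simp
          rw [if_neg h1, if_neg h2, hx, h3', hok]
          simp

-- proof-side model of B's scan over the segment list; k = current segment length so far
def chk : List (List Char) → Nat → Nat → Bool
  | [], k, g => decide (0 < k) && decide (g = 8)
  | [[]], k, g => decide (0 < k) && decide (g = 8)
  | [] :: s' :: ss, k, g => if k = 0 then false else chk (s' :: ss) 0 (g + 1)
  | (c :: seg) :: ss, k, g =>
    if ipv6AltHex.contains c then
      if k + 1 > 4 then false else chk (seg :: ss) (k + 1) g
    else false

lemma chk_one (k g : Nat) : chk [[]] k g = (decide (0 < k) && decide (g = 8)) := by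
  rw [chk.eq_def]

lemma chk_colon (k g : Nat) (s' : List Char) (ss : List (List Char)) :
    chk ([] :: s' :: ss) k g = if k = 0 then false else chk (s' :: ss) 0 (g + 1) := by
  rw [chk.eq_def]

lemma chk_char (k g : Nat) (c : Char) (seg : List Char) (ss : List (List Char)) :
    chk ((c :: seg) :: ss) k g =
      if ipv6AltHex.contains c then
        if k + 1 > 4 then false else chk (seg :: ss) (k + 1) g
      else false := by
  rw [chk.eq_def]

lemma foldl_none (l : List Char) : l.foldl ipv6AltStep none = none := by
  induction l with
  | nil => rfl
  | cons c rest ih => simpa [ipv6AltStep] using ih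

-- B's fold computes chk of the colon-split
lemma fold_eq_chk (l : List Char) : ∀ (k g : Nat),
    (match l.foldl ipv6AltStep (some (k, g)) with
     | none => false
     | some (a, b) => decide (0 < a) && (b == 8)) = chk (splitColon l) k g := by
  induction l with
  | nil =>
    intro k g
    simp only [List.foldl_nil, splitColon, chk_one]
    by_cases hg : g = 8 <;> simp [hg]
  | cons c rest ih =>
    intro k g
    obtain ⟨g1, gs, hsp⟩ : ∃ g1 gs, splitColon rest = g1 :: gs := by
      cases h : splitColon rest with
      | nil => exact absurd h (splitColon_ne_nil rest)
      | cons a b => exact ⟨a, b, rfl⟩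
    by_cases hc : c = ':'
    · subst hc
      have hsc : splitColon (':' :: rest) = [] :: g1 :: gs := by simp [splitColon, hsp]
      rw [hsc, chk_colon]
      by_cases hk : k = 0
      · simp [hk, ipv6AltStep, foldl_none]
      · rw [if_neg hk]
        have hstep : List.foldl ipv6AltStep (some (k, g)) (':' :: rest) =
            List.foldl ipv6AltStep (some (0, g + 1)) rest := by simp [ipv6AltStep, hk]
        rw [hstep, ← hsp]
        exact ih 0 (g + 1)
    · have hsc : splitColon (c :: rest) = (c :: g1) :: gs := by simp [splitColon, hc, hsp]
      rw [hsc, chk_char]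
      by_cases hhex : ipv6AltHex.contains c
      · have hmemc : c ∈ ipv6AltHex := by simpa using hhex
        rw [if_pos hhex]
        by_cases hbig : k + 1 > 4
        · simp [ipv6AltStep, hc, hmemc, hbig, foldl_none]
        · rw [if_neg hbig]
          have hk4 : ¬ 4 ≤ k := by omega
          have hstep : List.foldl ipv6AltStep (some (k, g)) (c :: rest) =
              List.foldl ipv6AltStep (some (k + 1, g)) rest := by
            simp [ipv6AltStep, hc, hmemc, hk4]
          rw [hstep, ← hsp]
          exact ih (k + 1) g
      · have hmemc : c ∉ ipv6AltHex := by simpa using hhex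
        rw [if_neg hhex]
        simp [ipv6AltStep, hc, hmemc, foldl_none]

-- unfolding chk over one whole segment (k ≤ 4 is an invariant of chk)
lemma chk_cons (seg : List Char) : ∀ (ss : List (List Char)) (k g : Nat), k ≤ 4 →
    chk (seg :: ss) k g =
      ((seg.all fun c => ipv6AltHex.contains c) && decide (k + seg.length ≤ 4) &&
        (match ss with
         | [] => decide (0 < k + seg.length) && decide (g = 8)
         | _ :: _ => decide (0 < k + seg.length) && chk ss 0 (g + 1))) := by
  induction seg with
  | nil =>
    intro ss k g hk
    cases ss with
    | nil => simp [chk_one, hk]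
    | cons s' ss' =>
      simp only [chk_colon, List.all_nil, List.length_nil, Nat.add_zero, Bool.true_and]
      by_cases h0 : k = 0
      · simp [h0]
      · simp [h0, Nat.pos_of_ne_zero h0, hk]
  | cons c seg' ih =>
    intro ss k g hk
    rw [chk_char]
    by_cases hhex : ipv6AltHex.contains c
    · have hmem : c ∈ ipv6AltHex := by simpa using hhex
      by_cases hbig : k + 1 > 4
      · cases ss <;> simp [hhex, hbig, hmem] <;> intros <;> omega
      · rw [if_pos hhex, if_neg hbig, ih ss (k + 1) g (by omega)]
        have harith : k + 1 + seg'.length = k + (c :: seg').length := by simp; omega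
        cases ss <;> simp [hmem, harith] <;> rfl
    · have hmem : c ∉ ipv6AltHex := by simpa using hhex
      cases ss <;> simp [hhex, hmem]

-- chk at the start of a fresh segment counts the groups and checks every segment
lemma chk_eq (ss : List (List Char)) : ∀ (g : Nat), ss ≠ [] →
    chk ss 0 g = (ss.all segOk && decide (g + ss.length = 9)) := by
  induction ss with
  | nil => intro g h; exact absurd rfl h
  | cons seg rest ih =>
    intro g _
    rw [chk_cons seg rest 0 g (by omega)]
    have e2 : (!seg.isEmpty) = decide (0 < seg.length) := by cases seg <;> simp
    cases rest with
    | nil =>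
      have e1 : decide (g = 8) = decide (g + 1 = 9) := decide_eq_decide.mpr (by omega)
      simp only [List.all_cons, List.all_nil, List.length_cons, List.length_nil, segOk,
        Nat.zero_add, e1, e2, Bool.and_true]
      cases seg.all fun c => ipv6AltHex.contains c <;>
        cases decide (seg.length ≤ 4) <;> cases decide (0 < seg.length) <;>
          cases decide (g + 1 = 9) <;> rfl
    | cons r rs =>
      rw [ih (g + 1) (by simp)]
      have e1 : decide (g + 1 + (r :: rs).length = 9) =
          decide (g + (seg :: r :: rs).length = 9) := decide_eq_decide.mpr (by simp; omega)
      simp only [List.all_cons, segOk, Nat.zero_add, e1, e2]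
      cases seg.all fun c => ipv6AltHex.contains c <;>
        cases decide (seg.length ≤ 4) <;> cases decide (0 < seg.length) <;>
          cases ((r :: rs).all segOk) <;>
            cases decide (g + (seg :: r :: rs).length = 9) <;> rfl

-- ===== VERDICT (by name: the statement is the Claim_ definition above) =====
theorem ipv6_spec : Claim_equal_ipv6 := by
  intro s _
  unfold Spec_ipv6
  simp only [ipv6, ipv6_alt]
  rw [splitOn_colon, fold_eq_chk s.toList 0 1,
      chk_eq (splitColon s.toList) 1 (splitColon_ne_nil s.toList),
      segLoop_eq_all]
  have h8 : (1 + (splitColon s.toList).length = 9) ↔ ((splitColon s.toList).length = 8) := by omega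
  by_cases hlen : (splitColon s.toList).length = 8 <;> simp [hlen, h8]
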